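-- pv_equiv track=rewrite | github.com/nightshiba/sast-metrics-aggregator | src/normalization.py | normalize_languages
-- ===== SOURCE A (Python) =====
-- from typing import List
--
-- def normalize_languages(languages: List[str]) -> List[str]:
--     language_map = {
--         # SonarQube doesn't distinguish between C and C++
--         'c/c++': ['cpp', 'c++', 'c', 'cfamily'],
--         # Joern and CodeQL don't distinguish between Java and Kotlin
--         'kotlin/java': ['java', 'kotlin', 'kt', 'android'],
--         # CodeQL doesn't distinguish between JavaScript and TypeScript
--         'js/ts': ['js', 'ts', 'javascript', 'typescript'],
--         'c#': ['csharp', 'cs'],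
--         'python': ['py'],
--         'ruby': ['rb'],
--         'go': [],
--         'php': [],
--         'scala': [],
--         'rust': [],
--         'swift': [],
--         'vb.net': ['vbnet'],
--         'lua': [],
--         'r': [],
--         'elixir': [],
--         'ocaml': [],
--         'html': [],
--         'css': [],
--         'xml': [],
--         'yaml': [],
--         'json': [],
--         'bash': ['sh', 'shell'],
--         'dockerfile': ['docker'],
--         'terraform': ['hcl', 'cloudformation'],
--     }
--     new_languages = set()
--     for language in languages:
--         was_added = False
--         for language_name, language_aliases in language_map.items():
--             if language == language_name or language in language_aliases:
--                 was_added = True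
--                 new_languages.add(language_name)
--                 break
--         if not was_added:
--             new_languages.add('other')  # +'-'+self.data_source+'-'+language)
--     return list(new_languages)
-- ===== SOURCE B (Python) =====
-- # Flat reverse lookup table: every canonical name and every alias maps directly
-- # to its canonical category; no grouped map, no per-element scan.
-- CANONICAL = {
--     'c/c++': 'c/c++', 'cpp': 'c/c++', 'c++': 'c/c++', 'c': 'c/c++', 'cfamily': 'c/c++',
--     'kotlin/java': 'kotlin/java', 'java': 'kotlin/java', 'kotlin': 'kotlin/java',
--     'kt': 'kotlin/java', 'android': 'kotlin/java',
--     'js/ts': 'js/ts', 'js': 'js/ts', 'ts': 'js/ts', 'javascript': 'js/ts', 'typescript': 'js/ts',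
--     'c#': 'c#', 'csharp': 'c#', 'cs': 'c#',
--     'python': 'python', 'py': 'python',
--     'ruby': 'ruby', 'rb': 'ruby',
--     'go': 'go', 'php': 'php', 'scala': 'scala', 'rust': 'rust', 'swift': 'swift',
--     'vb.net': 'vb.net', 'vbnet': 'vb.net',
--     'lua': 'lua', 'r': 'r', 'elixir': 'elixir', 'ocaml': 'ocaml', 'html': 'html',
--     'css': 'css', 'xml': 'xml', 'yaml': 'yaml', 'json': 'json',
--     'bash': 'bash', 'sh': 'bash', 'shell': 'bash',
--     'dockerfile': 'dockerfile', 'docker': 'dockerfile',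
--     'terraform': 'terraform', 'hcl': 'terraform', 'cloudformation': 'terraform',
-- }
--
-- def normalize_languages(languages):
--     return list({CANONICAL.get(language, 'other') for language in languages})
-- ===== Notes on version B (the rewrite author's own statement) =====
-- stated objective: faster
-- what changed: Replaces A's grouped map and per-element linear scan (flag + break over name/alias lists) by a flat alias->canonical module-level lookup table and a staged map-then-dedupe set comprehension with CANONICAL.get(language, 'other').
import Mathlib
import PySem

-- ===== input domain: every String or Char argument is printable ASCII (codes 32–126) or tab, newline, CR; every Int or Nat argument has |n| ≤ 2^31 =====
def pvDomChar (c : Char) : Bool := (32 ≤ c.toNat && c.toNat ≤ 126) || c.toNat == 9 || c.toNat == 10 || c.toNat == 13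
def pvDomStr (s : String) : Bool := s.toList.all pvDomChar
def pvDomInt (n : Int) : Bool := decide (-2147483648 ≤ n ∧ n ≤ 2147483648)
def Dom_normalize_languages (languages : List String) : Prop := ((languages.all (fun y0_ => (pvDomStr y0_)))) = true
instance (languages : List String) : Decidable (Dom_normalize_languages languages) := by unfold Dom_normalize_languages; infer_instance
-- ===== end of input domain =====

-- B replaces A's grouped map + per-element linear scan by a flat alias->canonical lookup table
-- and a staged map-then-dedupe (idiomatic; same result). Both Pythons return list(set(...));
-- equality here is of the PySem.Set of canonicals in input order.

-- ===== PORT A =====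
-- the literal language_map, in dict insertion order
def pvLangMap : List (String × List String) :=
  [("c/c++", ["cpp", "c++", "c", "cfamily"]),
   ("kotlin/java", ["java", "kotlin", "kt", "android"]),
   ("js/ts", ["js", "ts", "javascript", "typescript"]),
   ("c#", ["csharp", "cs"]),
   ("python", ["py"]),
   ("ruby", ["rb"]),
   ("go", []), ("php", []), ("scala", []), ("rust", []), ("swift", []),
   ("vb.net", ["vbnet"]),
   ("lua", []), ("r", []), ("elixir", []), ("ocaml", []), ("html", []),
   ("css", []), ("xml", []), ("yaml", []), ("json", []),
   ("bash", ["sh", "shell"]),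
   ("dockerfile", ["docker"]),
   ("terraform", ["hcl", "cloudformation"])]

-- A's inner for-loop with break: first (name, aliases) matching the language, if any
def pvScan : List (String × List String) → String → Option String
  | [], _ => none
  | (k, als) :: rest, s => if s == k || als.contains s then some k else pvScan rest s

def normalize_languages (languages : List String) : List String :=
  languages.foldl
    (fun acc s =>
      match pvScan pvLangMap s with
      | some k => PySem.Set.add acc k
      | none => PySem.Set.add acc "other")
    PySem.Set.empty

-- ===== PORT B =====
-- B's flat literal CANONICAL dict: every canonical name and every alias -> canonical
def pvCanonical : PySem.Dict String String :=
  PySem.Dict.mk [("c/c++", "c/c++"), ("cpp", "c/c++"), ("c++", "c/c++"), ("c", "c/c++"), ("cfamily", "c/c++"), ("kotlin/java", "kotlin/java"), ("java", "kotlin/java"), ("kotlin", "kotlin/java"), ("kt", "kotlin/java"), ("android", "kotlin/java"), ("js/ts", "js/ts"), ("js", "js/ts"), ("ts", "js/ts"), ("javascript", "js/ts"), ("typescript", "js/ts"), ("c#", "c#"), ("csharp", "c#"), ("cs", "c#"), ("python", "python"), ("py", "python"), ("ruby", "ruby"), ("rb", "ruby"), ("go", "go"), ("php", "php"), ("scala",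 "scala"), ("rust", "rust"), ("swift", "swift"), ("vb.net", "vb.net"), ("vbnet", "vb.net"), ("lua", "lua"), ("r", "r"), ("elixir", "elixir"), ("ocaml", "ocaml"), ("html", "html"), ("css", "css"), ("xml", "xml"), ("yaml", "yaml"), ("json", "json"), ("bash", "bash"), ("sh", "bash"), ("shell", "bash"), ("dockerfile", "dockerfile"), ("docker", "dockerfile"), ("terraform", "terraform"), ("hcl", "terraform"), ("cloudformation", "terraform")]

-- staged: map every input to its canonical, then dedupe with set(...)
def normalize_languages_alt (languages : List String) : List String :=
  PySem.Set.ofList (languages.map (fun language => pvCanonical.getD language "other"))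

-- ===== PRECONDITION & SPEC =====
def Spec_normalize_languages (languages : List String) (out : List String) : Prop := out = normalize_languages_alt languages
instance (languages : List String) (out : List String) : Decidable (Spec_normalize_languages languages out) := by unfold Spec_normalize_languages; infer_instance

-- ===== CLAIM =====
def Claim_equal_normalize_languages : Prop := ∀ (languages : List String), Dom_normalize_languages languages → Spec_normalize_languages languages (normalize_languages languages)

-- ===== LEMMAS AND PROOFS =====

-- A's map, flattened: each entry contributes its key then its aliases, all mapped to key
def pvFlat (m : List (String × List String)) : List (String × String) :=
  m.flatMap (fun p => (p.1, p.1) :: p.2.map (fun a => (a, p.1)))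

lemma lookup_aliases (k : String) (als : List String) (rest : List (String × String)) (s : String) :
    (PySem.Dict.mk (als.map (fun a => (a, k)) ++ rest)).get? s =
      if als.contains s then some k else (PySem.Dict.mk rest).get? s := by
  induction als with
  | nil => rfl
  | cons a t ih =>
    simp only [List.map_cons, List.cons_append, PySem.Dict.get?_mk_cons, ih]
    cases hb : a == s with
    | true =>
      have hsa : a = s := eq_of_beq hb
      subst hsa; simp
    | false =>
      have hne : s ≠ a := Ne.symm (ne_of_beq_false hb)
      simp [hne]

lemma lookup_flat (m : List (String × List String)) (s : String) :
    (PySem.Dict.mk (pvFlat m)).get? s = pvScan m s := by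
  induction m with
  | nil => rfl
  | cons p t ih =>
    obtain ⟨k, als⟩ := p
    simp only [pvFlat, List.flatMap_cons, List.cons_append, PySem.Dict.get?_mk_cons,
      lookup_aliases, pvScan]
    rw [show (t.flatMap (fun p => (p.1, p.1) :: p.2.map (fun a => (a, p.1)))) = pvFlat t from rfl, ih]
    cases hk : k == s with
    | true =>
      have hks : k = s := eq_of_beq hk
      subst hks; simp
    | false =>
      have hne : s ≠ k := Ne.symm (ne_of_beq_false hk)
      have hsk : (s == k) = false := beq_eq_false_iff_ne.mpr hne
      simp only [hsk, Bool.false_or]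
      simp

-- B's flat literal is exactly A's map flattened
set_option maxRecDepth 4000 in
lemma pvCanonical_eq : pvCanonical = PySem.Dict.mk (pvFlat pvLangMap) := by decide

lemma elem_eq (s : String) :
    (match pvScan pvLangMap s with
     | some k => k
     | none => "other") = pvCanonical.getD s "other" := by
  rw [PySem.Dict.getD_eq_get?_getD, pvCanonical_eq, lookup_flat]
  cases pvScan pvLangMap s <;> rfl

-- ===== VERDICT =====
theorem normalize_languages_spec : Claim_equal_normalize_languages := by
  intro languages _
  unfold Spec_normalize_languages normalize_languages normalize_languages_alt
  rw [PySem.Set.ofList_eq_foldl, List.foldl_map]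
  apply PySem.List.foldl_congr_mem
  intro acc s _
  rw [← elem_eq s]
  cases pvScan pvLangMap s <;> rfl
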